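-- pv_equiv track=rewrite | github.com/Juligoch11/Metodos1_julian_gomez | Desktop/proyecto-N3/cupicoin.py | buscar_transaccion
-- ===== SOURCE A (Python) =====
-- def buscar_transaccion (transaccion:list,codigo_transaccion:str)->dict:
--     todo=None
--     for nuevo in transaccion:
--        for i in nuevo:
--            b=type(i)
--            if b == int:
--               dict2=nuevo[i]
--               cod=dict2["codigo"]
--               if cod==codigo_transaccion:
--                   todo=nuevo[i]
--     return todo
-- ===== SOURCE B (Python) =====
-- def buscar_transaccion(transaccion, codigo_transaccion):
--     for nuevo in reversed(transaccion):
--         for i in reversed(list(nuevo)):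
--             if type(i) == int:
--                 dict2 = nuevo[i]
--                 if dict2["codigo"] == codigo_transaccion:
--                     return dict2
--     return None
-- ===== Notes on version B (the rewrite author's own statement) =====
-- stated objective: alternative
-- what changed: Replaces A's full forward scan that keeps overwriting a 'last match' accumulator with a reverse scan (outer list and inner keys reversed) that returns the first match immediately, no accumulator.
import Mathlib
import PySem

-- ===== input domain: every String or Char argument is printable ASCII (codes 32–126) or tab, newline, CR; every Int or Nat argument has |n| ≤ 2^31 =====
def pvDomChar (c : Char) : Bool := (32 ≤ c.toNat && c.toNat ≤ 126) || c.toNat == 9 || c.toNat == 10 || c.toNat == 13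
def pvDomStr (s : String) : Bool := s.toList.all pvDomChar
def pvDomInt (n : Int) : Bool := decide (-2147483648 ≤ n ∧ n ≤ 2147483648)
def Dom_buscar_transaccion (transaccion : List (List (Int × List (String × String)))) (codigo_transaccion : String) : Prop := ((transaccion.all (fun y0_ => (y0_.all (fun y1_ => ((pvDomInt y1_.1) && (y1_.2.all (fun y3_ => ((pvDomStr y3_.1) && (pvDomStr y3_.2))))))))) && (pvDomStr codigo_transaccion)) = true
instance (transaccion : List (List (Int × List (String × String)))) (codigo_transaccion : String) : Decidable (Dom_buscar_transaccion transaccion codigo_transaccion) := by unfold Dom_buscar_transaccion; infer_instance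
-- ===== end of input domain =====

-- B replaces A's accumulate-the-last-match full forward scan by a reverse scan with early return (alternative decomposition, same result).

-- ===== PORT A =====
def buscar_transaccion (transaccion : List (List (Int × List (String × String)))) (codigo_transaccion : String) : Option (List (String × String)) :=
  transaccion.foldl (fun todo nuevo =>
    ((PySem.Dict.ofList nuevo).items).foldl (fun todo iv =>
      -- b = type(i); b == int always holds here: the keys are Int
      -- dict2 = nuevo[i]: i is the key being iterated, so its value is the paired value (Dict keys are unique)
      let dict2 := iv.2
      match PySem.Dict.get? (PySem.Dict.ofList dict2) "codigo" with
      | some cod => if cod == codigo_transaccion then some dict2 else todo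
      | none => todo   -- Python raises KeyError here: these inputs are excluded by Pre_
      ) todo) none

-- ===== PORT B =====
-- inner loop of B: 'for i in reversed(list(nuevo)): … return dict2' — first match wins
def pvInnerB (codigo_transaccion : String) : List (Int × List (String × String)) → Option (List (String × String))
  | [] => none
  | iv :: rest =>
      match PySem.Dict.get? (PySem.Dict.ofList iv.2) "codigo" with
      | some cod => if cod == codigo_transaccion then some iv.2 else pvInnerB codigo_transaccion rest
      | none => pvInnerB codigo_transaccion rest   -- Python raises KeyError here: excluded by Pre_

-- outer loop of B: 'for nuevo in reversed(transaccion): …'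
def pvOuterB (codigo_transaccion : String) : List (List (Int × List (String × String))) → Option (List (String × String))
  | [] => none
  | nuevo :: rest =>
      match pvInnerB codigo_transaccion (((PySem.Dict.ofList nuevo).items).reverse) with
      | some d => some d
      | none => pvOuterB codigo_transaccion rest

def buscar_transaccion_alt (transaccion : List (List (Int × List (String × String)))) (codigo_transaccion : String) : Option (List (String × String)) :=
  pvOuterB codigo_transaccion transaccion.reverse

-- ===== PRECONDITION & SPEC =====
-- Pre_ excludes exactly the inputs on which Python A raises KeyError: some iterated sub-dict has no "codigo" key.
def Pre_buscar_transaccion (transaccion : List (List (Int × List (String × String)))) (codigo_transaccion : String) : Prop :=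
  ∀ nuevo ∈ transaccion, ∀ iv ∈ (PySem.Dict.ofList nuevo).items, PySem.Dict.contains (PySem.Dict.ofList iv.2) "codigo" = true
instance (transaccion : List (List (Int × List (String × String)))) (codigo_transaccion : String) : Decidable (Pre_buscar_transaccion transaccion codigo_transaccion) := by unfold Pre_buscar_transaccion; infer_instance

def pvWitness_buscar_transaccion : (List (List (Int × List (String × String)))) × String :=
  ([[(0, [("codigo", "x")])], [(1, [("codigo", "y"), ("m", "z")])]], "y")

def Spec_buscar_transaccion (transaccion : List (List (Int × List (String × String)))) (codigo_transaccion : String) (out : Option (List (String × String))) : Prop := out = buscar_transaccion_alt transaccion codigo_transaccion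
instance (transaccion : List (List (Int × List (String × String)))) (codigo_transaccion : String) (out : Option (List (String × String))) : Decidable (Spec_buscar_transaccion transaccion codigo_transaccion out) := by unfold Spec_buscar_transaccion; infer_instance

-- ===== CLAIM (what is proved, stated in full; the proofs are below) =====
def Claim_equal_buscar_transaccion : Prop := ∀ (transaccion : List (List (Int × List (String × String)))) (codigo_transaccion : String), Dom_buscar_transaccion transaccion codigo_transaccion → Pre_buscar_transaccion transaccion codigo_transaccion → Spec_buscar_transaccion transaccion codigo_transaccion (buscar_transaccion transaccion codigo_transaccion)

-- ===== LEMMAS AND PROOFS =====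

-- the per-item "match result" both programs decide on
def pvG (codigo_transaccion : String) (iv : Int × List (String × String)) : Option (List (String × String)) :=
  match PySem.Dict.get? (PySem.Dict.ofList iv.2) "codigo" with
  | some cod => if cod == codigo_transaccion then some iv.2 else none
  | none => none

theorem pvInnerB_eq_findSome (c : String) (l : List (Int × List (String × String))) :
    pvInnerB c l = l.findSome? (pvG c) := by
  induction l with
  | nil => rfl
  | cons iv rest ih =>
      simp only [pvInnerB, List.findSome?, pvG]
      cases h : PySem.Dict.get? (PySem.Dict.ofList iv.2) "codigo" with
      | none => simpa using ih
      | some cod =>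
          by_cases hc : cod == c
          · simp [hc]
          · simp [hc, ih]

theorem pvOuterB_eq_findSome (c : String) (l : List (List (Int × List (String × String)))) :
    pvOuterB c l = l.findSome? (fun nuevo => pvInnerB c (((PySem.Dict.ofList nuevo).items).reverse)) := by
  induction l with
  | nil => rfl
  | cons nuevo rest ih =>
      simp only [pvOuterB, List.findSome?]
      cases h : pvInnerB c (((PySem.Dict.ofList nuevo).items).reverse) <;> simp [ih]

-- the accumulate-last foldl equals "first some in reverse", then the initial value
theorem pvFoldl_or_eq {α β : Type} (f : α → Option β) (l : List α) (init : Option β) :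
    l.foldl (fun acc x => (f x).or acc) init = (l.reverse.findSome? f).or init := by
  induction l generalizing init with
  | nil => simp
  | cons x xs ih =>
      simp only [List.foldl_cons, List.reverse_cons, List.findSome?_append, ih]
      cases hxs : xs.reverse.findSome? f <;> cases hx : f x <;> simp [List.findSome?, hx, Option.or]

theorem buscar_transaccion_spec : Claim_equal_buscar_transaccion := by
  intro transaccion codigo_transaccion _ _
  unfold Spec_buscar_transaccion buscar_transaccion buscar_transaccion_alt
  have hstep : ∀ (todo : Option (List (String × String))) (iv : Int × List (String × String)),
      (match PySem.Dict.get? (PySem.Dict.ofList iv.2) "codigo" with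
       | some cod => if cod == codigo_transaccion then some iv.2 else todo
       | none => todo) = (pvG codigo_transaccion iv).or todo := by
    intro todo iv
    unfold pvG
    cases h : PySem.Dict.get? (PySem.Dict.ofList iv.2) "codigo" with
    | none => rfl
    | some cod => by_cases hc : cod == codigo_transaccion <;> simp [hc, Option.or]
  have hinner : ∀ (todo : Option (List (String × String))) (nuevo : List (Int × List (String × String))),
      ((PySem.Dict.ofList nuevo).items).foldl (fun todo iv =>
        match PySem.Dict.get? (PySem.Dict.ofList iv.2) "codigo" with
        | some cod => if cod == codigo_transaccion then some iv.2 else todo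
        | none => todo) todo
      = (pvInnerB codigo_transaccion (((PySem.Dict.ofList nuevo).items).reverse)).or todo := by
    intro todo nuevo
    rw [pvInnerB_eq_findSome, PySem.List.foldl_congr_mem _ _ _ _ (fun acc x _ => hstep acc x), pvFoldl_or_eq]
  calc transaccion.foldl (fun todo nuevo =>
        ((PySem.Dict.ofList nuevo).items).foldl (fun todo iv =>
          match PySem.Dict.get? (PySem.Dict.ofList iv.2) "codigo" with
          | some cod => if cod == codigo_transaccion then some iv.2 else todo
          | none => todo) todo) none
      = transaccion.foldl (fun todo nuevo =>
          (pvInnerB codigo_transaccion (((PySem.Dict.ofList nuevo).items).reverse)).or todo) none := by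
        exact PySem.List.foldl_congr_mem _ _ _ _ (fun acc x _ => hinner acc x)
    _ = (transaccion.reverse.findSome? (fun nuevo => pvInnerB codigo_transaccion (((PySem.Dict.ofList nuevo).items).reverse))).or none :=
        pvFoldl_or_eq _ _ _
    _ = pvOuterB codigo_transaccion transaccion.reverse := by
        rw [pvOuterB_eq_findSome, Option.or_none]
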